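-- pv_equiv track=rewrite | github.com/iPriyadarshi/Data-Structures-and-Algorithms | Leetcode/883. Projection Area of 3D Shapes.py | projectionArea
-- ===== SOURCE A (Python) =====
-- from typing import List
--
-- def projectionArea(grid: List[List[int]]) -> int:
--     # T.C = O(N^2), N = len(grid)
--     # S.C = O(1)
--     n = len(grid)
--
--     top_area = 0  # xy-plane: count all non-zero cells
--     for i in range(n):
--         for j in range(n):
--             area = 1 if grid[i][j] != 0 else 0
--             top_area += area
--
--     front_area = 0  # xz-plane: max in each row
--     for i in range(n):
--         max_in_row = 0
--         for j in range(n):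
--             max_in_row = max(max_in_row, grid[i][j])
--         front_area += max_in_row
--
--     side_area = 0  # yz-plane: max in each column
--     for i in range(n):
--         max_in_col = 0
--         for j in range(n):
--             max_in_col = max(max_in_col, grid[j][i])
--         side_area += max_in_col
--
--     return top_area + front_area + side_area
-- ===== SOURCE B (Python) =====
-- def projectionArea(grid):
--     # Single fused pass over the n x n grid: one accumulator for the top view,
--     # a running row maximum for the front view, and a per-column maximum list
--     # for the side view, summed at the end.
--     n = len(grid)
--     top = 0
--     front = 0
--     col_max = [0] * n
--     for row in grid:
--         row_max = 0
--         for j in range(n):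
--             v = row[j]
--             if v != 0:
--                 top += 1
--             if v > row_max:
--                 row_max = v
--             if v > col_max[j]:
--                 col_max[j] = v
--         front += row_max
--     return top + front + sum(col_max)
-- ===== Notes on version B (the rewrite author's own statement) =====
-- stated objective: faster
-- what changed: Replaces A's three separate n x n index-loop passes (top count, row maxima, column maxima via transposed grid[j][i] indexing) by a single fused pass over the rows that counts non-zero cells, tracks a running row maximum, and maintains a per-column maximum list summed at the end.
import Mathlib
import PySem

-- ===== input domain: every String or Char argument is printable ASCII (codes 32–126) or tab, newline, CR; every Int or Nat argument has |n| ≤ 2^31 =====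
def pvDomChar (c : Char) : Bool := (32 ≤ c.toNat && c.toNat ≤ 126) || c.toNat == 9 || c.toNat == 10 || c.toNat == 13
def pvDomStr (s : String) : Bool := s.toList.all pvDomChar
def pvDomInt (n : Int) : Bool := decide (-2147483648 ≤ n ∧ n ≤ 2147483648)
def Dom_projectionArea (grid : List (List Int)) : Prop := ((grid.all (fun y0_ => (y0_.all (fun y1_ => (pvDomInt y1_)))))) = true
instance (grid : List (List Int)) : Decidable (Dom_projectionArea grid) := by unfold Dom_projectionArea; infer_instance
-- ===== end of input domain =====

-- B fuses A's three n×n index-loop passes into one pass over the rows (non-zero count, running row max, running per-column max list); measured faster by a constant factor (single traversal, no transposed re-indexing).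


-- ===== PORT A =====
def projectionArea (grid : List (List Int)) : Int :=
  let n : Int := grid.length
  let top_area : Int := (PySem.List.pyRange 0 n 1).foldl (fun acc i =>
      (PySem.List.pyRange 0 n 1).foldl (fun acc2 j =>
        acc2 + (if PySem.List.pyGetD (PySem.List.pyGetD grid i []) j 0 ≠ 0 then (1:Int) else 0)) acc) 0
  let front_area : Int := (PySem.List.pyRange 0 n 1).foldl (fun acc i =>
      acc + (PySem.List.pyRange 0 n 1).foldl (fun m j =>
        max m (PySem.List.pyGetD (PySem.List.pyGetD grid i []) j 0)) 0) 0
  let side_area : Int := (PySem.List.pyRange 0 n 1).foldl (fun acc i =>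
      acc + (PySem.List.pyRange 0 n 1).foldl (fun m j =>
        max m (PySem.List.pyGetD (PySem.List.pyGetD grid j []) i 0)) 0) 0
  top_area + front_area + side_area

-- ===== PORT B =====
def projectionArea_alt (grid : List (List Int)) : Int :=
  let n : Int := grid.length
  let s : Int × Int × List Int := grid.foldl (fun st row =>
      let r : Int × Int × List Int := (PySem.List.pyRange 0 n 1).foldl (fun q j =>
          let v := PySem.List.pyGetD row j 0
          (if v ≠ 0 then q.1 + 1 else q.1,
           if v > q.2.1 then v else q.2.1,
           if v > PySem.List.pyGetD q.2.2 j 0 then PySem.List.pySetD q.2.2 j v else q.2.2))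
        (st.1, 0, st.2.2)
      (r.1, st.2.1 + r.2.1, r.2.2))
    (0, 0, List.replicate grid.length 0)
  s.1 + s.2.1 + s.2.2.sum

-- ===== PRECONDITION & SPEC =====
-- Pre_ excludes exactly the grids with a row shorter than len(grid), on which both A and B raise IndexError.
def Pre_projectionArea (grid : List (List Int)) : Prop :=
  ∀ row ∈ grid, grid.length ≤ row.length
instance (grid : List (List Int)) : Decidable (Pre_projectionArea grid) := by
  unfold Pre_projectionArea; infer_instance
def pvWitness_projectionArea : List (List Int) := [[1, 2], [3, 0]]

def Spec_projectionArea (grid : List (List Int)) (out : Int) : Prop := out = projectionArea_alt grid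
instance (grid : List (List Int)) (out : Int) : Decidable (Spec_projectionArea grid out) := by unfold Spec_projectionArea; infer_instance

-- ===== CLAIM (what is proved, stated in full; the proofs are below) =====
def Claim_equal_projectionArea : Prop := ∀ (grid : List (List Int)), Dom_projectionArea grid → Pre_projectionArea grid → Spec_projectionArea grid (projectionArea grid)

-- ===== LEMMAS AND PROOFS =====
def colStep (c row : List Int) : List Int := (c.zip row).map (fun p => max p.1 p.2)

def step3 (row : List Int) (q : Int × Int × List Int) (j : Int) : Int × Int × List Int :=
  let v := PySem.List.pyGetD row j 0
  (if v ≠ 0 then q.1 + 1 else q.1,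
   if v > q.2.1 then v else q.2.1,
   if v > PySem.List.pyGetD q.2.2 j 0 then PySem.List.pySetD q.2.2 j v else q.2.2)

def stepO (n : Int) (st : Int × Int × List Int) (row : List Int) : Int × Int × List Int :=
  let r : Int × Int × List Int := (PySem.List.pyRange 0 n 1).foldl (step3 row) (st.1, 0, st.2.2)
  (r.1, st.2.1 + r.2.1, r.2.2)

lemma ite_max (m v : Int) : (if v > m then v else m) = max m v := by
  simp [max_def]; split_ifs <;> omega

lemma ite_count (a v : Int) : (if v ≠ 0 then a + 1 else a) = a + (if v ≠ 0 then 1 else 0) := by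
  split_ifs <;> omega

lemma colStep_length (c row : List Int) (h : c.length ≤ row.length) :
    (colStep c row).length = c.length := by
  simp [colStep]; omega

lemma colStep_getD (c row : List Int) (k : Nat) (h1 : k < c.length) (h2 : k < row.length) :
    (colStep c row).getD k 0 = max (c.getD k 0) (row.getD k 0) := by
  rw [List.getD_eq_getElem _ _ (by simp [colStep]; omega), List.getD_eq_getElem _ _ h1,
      List.getD_eq_getElem _ _ h2]
  simp [colStep, List.getElem_zip]

lemma colApp_length (cm row : List Int) (k : Nat) (hk : k ≤ cm.length)
    (hrow : cm.length ≤ row.length) :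
    (colStep cm (row.take k) ++ cm.drop k).length = cm.length := by
  simp [colStep]; omega

lemma colApp_getD (cm row : List Int) (k : Nat) (hk : k ≤ cm.length)
    (hrow : cm.length ≤ row.length) (j : Nat) (hj : j < cm.length) :
    (colStep cm (row.take k) ++ cm.drop k).getD j 0
    = if j < k then max (cm.getD j 0) (row.getD j 0) else cm.getD j 0 := by
  have hcl : (colStep cm (row.take k)).length = k := by
    simp [colStep]; omega
  by_cases hjk : j < k
  · rw [List.getD_append _ _ _ j (by rw [hcl]; exact hjk)]
    rw [colStep_getD cm (row.take k) j (by omega) (by simp; omega)]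
    have htake : (row.take k).getD j 0 = row.getD j 0 := by
      rw [List.getD_eq_getElem _ _ (by simp; omega), List.getD_eq_getElem _ _ (by omega : j < row.length)]
      simp [List.getElem_take]
    rw [htake]
    simp [hjk]
  · rw [List.getD_append_right _ _ _ j (by rw [hcl]; omega), hcl]
    rw [List.getD_eq_getElem _ _ (by simp [List.length_drop]; omega), List.getD_eq_getElem _ _ hj]
    have hjk' : k + (j - k) = j := by omega
    simp [hjk, List.getElem_drop, hjk']

lemma colUpd (cm row : List Int) (k : Nat) (hk : k < cm.length)
    (hrow : cm.length ≤ row.length) :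
    (if row.getD k 0 > (colStep cm (row.take k) ++ cm.drop k).getD k 0
     then (colStep cm (row.take k) ++ cm.drop k).set k (row.getD k 0)
     else colStep cm (row.take k) ++ cm.drop k)
    = colStep cm (row.take (k + 1)) ++ cm.drop (k + 1) := by
  have hCk : (colStep cm (row.take k) ++ cm.drop k).getD k 0 = cm.getD k 0 := by
    rw [colApp_getD cm row k (by omega) hrow k hk]; simp
  have hlenL : ∀ b : List Int, b.length = cm.length →
      (if row.getD k 0 > cm.getD k 0 then b.set k (row.getD k 0) else b).length = cm.length := by
    intro b hb; split_ifs <;> simp [hb]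
  rw [hCk]
  apply List.ext_getElem
  · rw [hlenL _ (colApp_length cm row k (by omega) hrow),
        colApp_length cm row (k+1) (by omega) hrow]
  · intro j hj1 hj2
    have hjlen : j < cm.length := by
      rw [hlenL _ (colApp_length cm row k (by omega) hrow)] at hj1; exact hj1
    have hR : (colStep cm (row.take (k+1)) ++ cm.drop (k+1)).getD j 0
        = if j < k + 1 then max (cm.getD j 0) (row.getD j 0) else cm.getD j 0 :=
      colApp_getD cm row (k+1) (by omega) hrow j hjlen
    have hL : (colStep cm (row.take k) ++ cm.drop k).getD j 0
        = if j < k then max (cm.getD j 0) (row.getD j 0) else cm.getD j 0 :=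
      colApp_getD cm row k (by omega) hrow j hjlen
    rw [← List.getD_eq_getElem _ 0 hj1, ← List.getD_eq_getElem _ 0 hj2, hR]
    have hjset : j < (colStep cm (row.take k) ++ cm.drop k).length := by
      rw [colApp_length cm row k (by omega) hrow]; exact hjlen
    by_cases hc : row.getD k 0 > cm.getD k 0
    · rw [if_pos hc]
      rw [List.getD_eq_getElem _ _ (by simpa using hjset), List.getElem_set]
      by_cases hjk : j = k
      · subst hjk
        rw [if_pos rfl, if_pos (by omega : j < j + 1)]
        simp only [max_def]
        split_ifs <;> omega
      · rw [if_neg (fun h => hjk h.symm), ← List.getD_eq_getElem _ 0 hjset, hL]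
        split_ifs <;> first | rfl | omega
    · rw [if_neg hc, hL]
      by_cases hjk : j = k
      · subst hjk
        rw [if_neg (by omega : ¬ j < j), if_pos (by omega : j < j + 1)]
        simp only [max_def]
        split_ifs <;> omega
      · split_ifs <;> first | rfl | omega

lemma inner_spec (row cm : List Int) (t m : Int) (k : Nat)
    (hk : k ≤ cm.length) (hrow : cm.length ≤ row.length) :
    (PySem.List.pyRange 0 (k : Int) 1).foldl (step3 row) (t, m, cm)
    = ((row.take k).foldl (fun a v => a + (if v ≠ 0 then 1 else 0)) t,
       (row.take k).foldl max m,
       colStep cm (row.take k) ++ cm.drop k) := by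
  induction k with
  | zero => simp [PySem.List.pyRange_one_eq_nil, colStep]
  | succ k ih =>
      have hcast : ((k + 1 : Nat) : Int) = (k : Int) + 1 := by push_cast; ring
      rw [hcast, PySem.List.pyRange_one_succ_right (by omega : (0:Int) ≤ (k:Int)),
          List.foldl_append, ih (by omega)]
      have hkr : k < row.length := by omega
      have hv : PySem.List.pyGetD row (k : Int) 0 = row.getD k 0 := by
        simp [PySem.List.pyGetD_natCast]
      have htake : row.take (k + 1) = row.take k ++ [row[k]] := by
        rw [List.take_add_one, List.getElem?_eq_getElem hkr]
        rfl
      simp only [List.foldl_cons, List.foldl_nil, step3, hv]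
      rw [htake, List.foldl_append, List.foldl_append]
      simp only [List.foldl_cons, List.foldl_nil]
      have hCk : PySem.List.pyGetD (colStep cm (row.take k) ++ cm.drop k) (k : Int) 0
          = (colStep cm (row.take k) ++ cm.drop k).getD k 0 := by
        simp [PySem.List.pyGetD_natCast]
      have hset : PySem.List.pySetD (colStep cm (row.take k) ++ cm.drop k) (k : Int) (row.getD k 0)
          = (colStep cm (row.take k) ++ cm.drop k).set k (row.getD k 0) := by
        simp [PySem.List.pySetD_natCast]
      rw [hCk, hset, colUpd cm row k (by omega) hrow]
      have hg : row.getD k 0 = row[k] := List.getD_eq_getElem _ _ hkr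
      rw [hg, ite_count, ite_max, ← htake]

lemma tripleFold (rows : List (List Int)) (n : Nat) (t f : Int) (c : List Int)
    (hc : c.length = n) (h : ∀ r ∈ rows, n ≤ r.length) :
    rows.foldl (stepO (n : Int)) (t, f, c)
    = (rows.foldl (fun a row => (row.take n).foldl (fun a v => a + (if v ≠ 0 then 1 else 0)) a) t,
       rows.foldl (fun a row => a + (row.take n).foldl max 0) f,
       rows.foldl (fun c row => colStep c (row.take n)) c) := by
  induction rows generalizing t f c with
  | nil => rfl
  | cons r rs ih =>
      have hr : n ≤ r.length := h r (by simp)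
      have hstep : stepO (n : Int) (t, f, c) r
          = ((r.take n).foldl (fun a v => a + (if v ≠ 0 then 1 else 0)) t,
             f + (r.take n).foldl max 0, colStep c (r.take n)) := by
        simp only [stepO]
        rw [inner_spec r c t 0 n (by omega) (by omega)]
        have hdrop : c.drop n = [] := by
          apply List.drop_eq_nil_of_le; omega
        rw [hdrop, List.append_nil]
      have hlen' : (colStep c (r.take n)).length = n := by
        simp [colStep]; omega
      rw [List.foldl_cons, hstep, ih _ _ _ hlen' (fun r' hr' => h r' (by simp [hr'])),
          List.foldl_cons, List.foldl_cons, List.foldl_cons]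

lemma colFold_length (rows : List (List Int)) (c : List Int)
    (h : ∀ r ∈ rows, c.length ≤ r.length) :
    (rows.foldl colStep c).length = c.length := by
  induction rows generalizing c with
  | nil => rfl
  | cons r rs ih =>
      have hr := h r (by simp)
      have h' : ∀ r' ∈ rs, (colStep c r).length ≤ r'.length := fun r' hr' => by
        rw [colStep_length c r hr]; exact h r' (by simp [hr'])
      rw [List.foldl_cons, ih _ h', colStep_length c r hr]

lemma colFold_getD (rows : List (List Int)) (c : List Int)
    (h : ∀ r ∈ rows, c.length ≤ r.length) (k : Nat) (hk : k < c.length) :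
    (rows.foldl colStep c).getD k 0
    = rows.foldl (fun m row => max m (row.getD k 0)) (c.getD k 0) := by
  induction rows generalizing c with
  | nil => rfl
  | cons r rs ih =>
      have hr := h r (by simp)
      have h' : ∀ r' ∈ rs, (colStep c r).length ≤ r'.length := fun r' hr' => by
        rw [colStep_length c r hr]; exact h r' (by simp [hr'])
      rw [List.foldl_cons, List.foldl_cons,
          ih _ h' (by rw [colStep_length c r hr]; exact hk),
          colStep_getD c r k hk (by omega)]

lemma colFold_eq_map (rows : List (List Int)) (c : List Int)
    (h : ∀ r ∈ rows, c.length ≤ r.length)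
    (hc : ∀ k, k < c.length → c.getD k 0 = 0) :
    rows.foldl colStep c
    = (List.range c.length).map (fun k => rows.foldl (fun m row => max m (row.getD k 0)) 0) := by
  apply List.ext_getElem
  · rw [colFold_length rows c h]; simp
  · intro k hk1 hk2
    have hkc : k < c.length := by rwa [colFold_length rows c h] at hk1
    rw [← List.getD_eq_getElem _ 0 hk1, colFold_getD rows c h k hkc, hc k hkc]
    simp

lemma pyRange_fold_take (row : List Int) (n : Nat) (h : n ≤ row.length)
    (f : Int → Int → Int) (init : Int) :
    (PySem.List.pyRange 0 (n : Int) 1).foldl (fun a j => f a (PySem.List.pyGetD row j 0)) init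
    = (row.take n).foldl f init := by
  have hl : ((row.take n).length : Int) = (n : Int) := by simp [List.length_take]; omega
  rw [← hl]
  rw [PySem.List.foldl_congr_mem _ _
      (fun a j => f a (PySem.List.pyGetD (row.take n) j 0)) _ (fun a j hj => by
        have hj' := (PySem.List.mem_pyRange_one).1 hj
        have h0 : 0 ≤ j := hj'.1
        have h1 : j < (n : Int) := by
          have := hj'.2; rwa [hl] at this
        have hjn : j.toNat < n := by omega
        show f a (PySem.List.pyGetD row j 0) = f a (PySem.List.pyGetD (row.take n) j 0)
        rw [PySem.List.pyGetD_eq_getElem row 0 h0 (by omega),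
            PySem.List.pyGetD_eq_getElem (row.take n) 0 h0 (by simp [List.length_take]; omega)]
        simp [List.getElem_take])]
  exact PySem.List.foldl_pyRange_zero_pyGetD' (row.take n) 0 f init

lemma topA_eq (grid : List (List Int)) (h : ∀ row ∈ grid, grid.length ≤ row.length) :
    (PySem.List.pyRange 0 (grid.length : Int) 1).foldl (fun acc i =>
        (PySem.List.pyRange 0 (grid.length : Int) 1).foldl (fun acc2 j =>
          acc2 + (if PySem.List.pyGetD (PySem.List.pyGetD grid i []) j 0 ≠ 0 then (1:Int) else 0)) acc) (0:Int)
    = grid.foldl (fun acc row => (row.take grid.length).foldl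
        (fun a v => a + (if v ≠ 0 then (1:Int) else 0)) acc) (0:Int) := by
  rw [PySem.List.foldl_pyRange_zero_pyGetD' grid ([] : List Int)
      (fun acc row => (PySem.List.pyRange 0 (grid.length : Int) 1).foldl (fun acc2 j =>
        acc2 + (if PySem.List.pyGetD row j 0 ≠ 0 then (1:Int) else 0)) acc) (0:Int)]
  refine PySem.List.foldl_congr_mem _ _ _ _ (fun acc row hrow => ?_)
  exact pyRange_fold_take row grid.length (h row hrow)
    (fun a v => a + (if v ≠ 0 then (1:Int) else 0)) acc

lemma frontA_eq (grid : List (List Int)) (h : ∀ row ∈ grid, grid.length ≤ row.length) :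
    (PySem.List.pyRange 0 (grid.length : Int) 1).foldl (fun acc i =>
        acc + (PySem.List.pyRange 0 (grid.length : Int) 1).foldl (fun m j =>
          max m (PySem.List.pyGetD (PySem.List.pyGetD grid i []) j 0)) 0) (0:Int)
    = grid.foldl (fun acc row => acc + (row.take grid.length).foldl max 0) (0:Int) := by
  rw [PySem.List.foldl_pyRange_zero_pyGetD' grid ([] : List Int)
      (fun acc row => acc + (PySem.List.pyRange 0 (grid.length : Int) 1).foldl (fun m j =>
        max m (PySem.List.pyGetD row j 0)) 0) (0:Int)]
  refine PySem.List.foldl_congr_mem _ _ _ _ (fun acc row hrow => ?_)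
  rw [pyRange_fold_take row grid.length (h row hrow) (fun m v => max m v) 0]

lemma sideA_inner (grid : List (List Int)) (i : Int) :
    (PySem.List.pyRange 0 (grid.length : Int) 1).foldl (fun m j =>
        max m (PySem.List.pyGetD (PySem.List.pyGetD grid j []) i 0)) 0
    = grid.foldl (fun m row => max m (PySem.List.pyGetD row i 0)) 0 :=
  PySem.List.foldl_pyRange_zero_pyGetD' grid ([] : List Int)
    (fun m row => max m (PySem.List.pyGetD row i 0)) 0

theorem main_eq (grid : List (List Int)) (hpre : ∀ row ∈ grid, grid.length ≤ row.length) :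
    projectionArea grid = projectionArea_alt grid := by
  have hB : projectionArea_alt grid
      = (grid.foldl (fun a row => (row.take grid.length).foldl
            (fun a v => a + (if v ≠ 0 then 1 else 0)) a) 0)
        + (grid.foldl (fun a row => a + (row.take grid.length).foldl max 0) 0)
        + (grid.foldl (fun c row => colStep c (row.take grid.length)) (List.replicate grid.length 0)).sum := by
    show (grid.foldl (stepO (grid.length : Int)) (0, 0, List.replicate grid.length 0)).1
        + (grid.foldl (stepO (grid.length : Int)) (0, 0, List.replicate grid.length 0)).2.1
        + (grid.foldl (stepO (grid.length : Int)) (0, 0, List.replicate grid.length 0)).2.2.sum = _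
    rw [tripleFold grid grid.length 0 0 _ (List.length_replicate) hpre]
  rw [hB]
  have hmap : grid.foldl (fun c row => colStep c (row.take grid.length)) (List.replicate grid.length 0)
      = (grid.map (fun row => row.take grid.length)).foldl colStep (List.replicate grid.length 0) := by
    rw [List.foldl_map]
  have hlen : ∀ r ∈ grid.map (fun row => row.take grid.length),
      (List.replicate grid.length (0:Int)).length ≤ r.length := by
    intro r hr
    obtain ⟨row, hrow, rfl⟩ := List.mem_map.1 hr
    simp only [List.length_replicate, List.length_take]
    have := hpre row hrow
    omega
  have hside : (PySem.List.pyRange 0 (grid.length : Int) 1).foldl (fun acc i =>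
      acc + (PySem.List.pyRange 0 (grid.length : Int) 1).foldl (fun m j =>
        max m (PySem.List.pyGetD (PySem.List.pyGetD grid j []) i 0)) 0) (0:Int)
      = (grid.foldl (fun c row => colStep c (row.take grid.length)) (List.replicate grid.length 0)).sum := by
    rw [hmap, colFold_eq_map _ _ hlen (by simp)]
    rw [PySem.List.foldl_congr_mem _ _
        (fun acc i => acc + grid.foldl (fun m row => max m (PySem.List.pyGetD row i 0)) 0) _
        (fun acc i _ => by rw [sideA_inner])]
    rw [PySem.List.foldl_add]
    rw [List.length_replicate]
    rw [PySem.List.pyRange_zero_nat grid.length, List.map_map]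
    simp only [Function.comp_def, PySem.List.pyGetD_natCast, zero_add]
    congr 1
    apply List.map_congr_left
    intro k hk
    have hkn : k < grid.length := List.mem_range.1 hk
    rw [List.foldl_map]
    refine PySem.List.foldl_congr_mem _ _ _ _ (fun m row hrow => ?_)
    have hkr : k < row.length := by have := hpre row hrow; omega
    rw [List.getD_eq_getElem (row.take grid.length) _ (by rw [List.length_take]; omega),
        List.getD_eq_getElem row _ hkr]
    simp [List.getElem_take]
  simp only [projectionArea]
  rw [topA_eq grid hpre, frontA_eq grid hpre, hside]

-- ===== VERDICT (by name: the statement is the Claim_ definition above) =====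
theorem projectionArea_spec : Claim_equal_projectionArea := by
  intro grid _ hpre
  exact main_eq grid hpre
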